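-- pv_equiv track=rewrite | github.com/aakashgangji/Leetcode | Mix/CountDistinctAfterRemoving0.py | countDistinct
-- ===== SOURCE A (Python) =====
-- def countDistinct(n: int) -> int:
--
--     s = str(n)
--     L = len(s)
--     count = 0
--     pow9 = 1
--     for i in range(1, L):
--         pow9 *= 9
--         count += pow9
--     has_zero_so_far = False
--     for i in range(L):
--         d_char = s[i]
--         d_val = int(d_char)
--
--         if d_val == 0:
--             has_zero_so_far = True
--             break
--
--         remaining_digits = L - 1 - i
--         pow9 = 9**remaining_digits
--         num_smaller_digits = d_val - 1
--         count += num_smaller_digits * pow9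
--     if not has_zero_so_far:
--         count += 1
--
--     return count
-- ===== SOURCE B (Python) =====
-- def countDistinct(n: int) -> int:
--     s = str(n)
--     res = 0
--     for i, ch in enumerate(s):
--         d = int(ch)
--         if d == 0:
--             rem = len(s) - i
--             return res * 9 ** rem + (9 ** rem - 9) // 8
--         res = res * 9 + d
--     return res
-- ===== Notes on version B (the rewrite author's own statement) =====
-- stated objective: alternative
-- what changed: B replaces A's two loops (a geometric-sum loop over shorter lengths plus a per-digit loop multiplying by 9**remaining) with a single Horner pass reading the digits in base 9, using the closed-form geometric sum (9**rem - 9)//8 only when a zero digit is hit.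
import Mathlib
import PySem

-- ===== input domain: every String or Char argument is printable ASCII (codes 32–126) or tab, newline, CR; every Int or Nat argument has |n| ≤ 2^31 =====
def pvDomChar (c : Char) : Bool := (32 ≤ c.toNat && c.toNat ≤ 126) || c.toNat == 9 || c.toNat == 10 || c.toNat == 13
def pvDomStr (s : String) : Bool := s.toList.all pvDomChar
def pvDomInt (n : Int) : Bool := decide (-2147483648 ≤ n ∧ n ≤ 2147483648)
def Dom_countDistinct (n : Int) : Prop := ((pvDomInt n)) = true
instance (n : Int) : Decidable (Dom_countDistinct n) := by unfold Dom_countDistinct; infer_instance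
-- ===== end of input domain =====

-- B counts zero-free positive integers ≤ n by one Horner pass over the digits in base 9,
-- with a closed-form geometric sum for the tail when a zero digit appears, instead of
-- A's separate shorter-length loop and per-digit 9**remaining products.

-- int(d_char) for a single character (ValueError, i.e. none, is impossible under Pre_)
def pvDig (c : Char) : Int := (PySem.Int.ofStr? (String.singleton c)).getD 0

-- ===== PORT A =====
-- for i in range(1, L): pow9 *= 9; count += pow9   (state = (count, pow9), L-1 iterations)
def pvAGeom : Nat → Int × Int
  | 0 => (0, 1)
  | k + 1 => let cp := pvAGeom k; (cp.1 + cp.2 * 9, cp.2 * 9)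

-- for i in range(L): … break on zero …   (returns (count, has_zero_so_far))
def pvALoop : List Char → Int → Int × Bool
  | [], count => (count, false)
  | c :: rest, count =>
    let d := pvDig c
    if d = 0 then (count, true)
    else pvALoop rest (count + (d - 1) * 9 ^ rest.length)

def countDistinct (n : Int) : Int :=
  let s := (PySem.Int.toStr n).toList
  let L := s.length
  let cp := pvAGeom (L - 1)
  let r := pvALoop s cp.1
  if r.2 then r.1 else r.1 + 1

-- ===== PORT B =====
def pvBLoop : List Char → Int → Int
  | [], res => res
  | c :: rest, res =>
    let d := pvDig c
    if d = 0 then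
      res * 9 ^ (rest.length + 1) + PySem.Int.floordiv (9 ^ (rest.length + 1) - 9) 8
    else pvBLoop rest (res * 9 + d)

def countDistinct_alt (n : Int) : Int :=
  pvBLoop ((PySem.Int.toStr n).toList) 0

-- ===== PRECONDITION & SPEC =====
-- For n < 0, str(n) starts with '-' and both A and B raise ValueError at int('-').
def Pre_countDistinct (n : Int) : Prop := 0 ≤ n
instance (n : Int) : Decidable (Pre_countDistinct n) := by unfold Pre_countDistinct; infer_instance
def pvWitness_countDistinct : Int := 7

def Spec_countDistinct (n : Int) (out : Int) : Prop := out = countDistinct_alt n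
instance (n : Int) (out : Int) : Decidable (Spec_countDistinct n out) := by unfold Spec_countDistinct; infer_instance

-- ===== CLAIM (what is proved, stated in full; the proofs are below) =====
def Claim_equal_countDistinct : Prop := ∀ (n : Int), Dom_countDistinct n → Pre_countDistinct n → Spec_countDistinct n (countDistinct n)

-- ===== LEMMAS AND PROOFS =====

-- Σ_{k=1}^{m-1} 9^k
def pvGeom : Nat → Int
  | 0 => 0
  | 1 => 0
  | (m + 2) => pvGeom (m + 1) + 9 ^ (m + 1)

theorem pvGeom_succ (m : Nat) (h : 1 ≤ m) : pvGeom (m + 1) = pvGeom m + 9 ^ m := by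
  cases m with
  | zero => omega
  | succ k => rfl

theorem pvAGeom_snd (k : Nat) : (pvAGeom k).2 = 9 ^ k := by
  induction k with
  | zero => rfl
  | succ k ih => simp [pvAGeom, ih]; ring

theorem pvAGeom_fst (k : Nat) : (pvAGeom k).1 = pvGeom (k + 1) := by
  induction k with
  | zero => rfl
  | succ k ih =>
    simp [pvAGeom, ih, pvAGeom_snd, pvGeom_succ (k + 1) (by omega)]
    ring

theorem pvALoop_shift (cs : List Char) (count : Int) :
    pvALoop cs count = ((pvALoop cs 0).1 + count, (pvALoop cs 0).2) := by
  induction cs generalizing count with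
  | nil => simp [pvALoop]
  | cons c rest ih =>
    simp only [pvALoop]
    split
    · simp
    · rw [ih, ih ((0 : Int) + _)]
      simp only [Prod.mk.injEq]
      exact ⟨by ring, trivial⟩

theorem pvGeom_mul_eight (m : Nat) (h : 1 ≤ m) : 8 * pvGeom m = 9 ^ m - 9 := by
  induction m with
  | zero => omega
  | succ k ih =>
    cases k with
    | zero => simp [pvGeom]
    | succ j =>
      rw [pvGeom_succ (j + 1) (by omega), mul_add, ih (by omega)]
      ring

theorem pvFloordiv_geom (m : Nat) (h : 1 ≤ m) :
    PySem.Int.floordiv (9 ^ m - 9) 8 = pvGeom m := by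
  rw [PySem.Int.floordiv_eq_ediv_of_pos (by norm_num : (0:Int) < 8), ← pvGeom_mul_eight m h]
  exact Int.mul_ediv_cancel_left _ (by norm_num)

theorem pvBLoop_shift (cs : List Char) (res : Int) :
    pvBLoop cs res = res * 9 ^ cs.length + pvBLoop cs 0 := by
  induction cs generalizing res with
  | nil => simp [pvBLoop]
  | cons c rest ih =>
    simp only [pvBLoop]
    split
    · simp [List.length_cons]
    · rw [ih (res * 9 + pvDig c), ih (0 * 9 + pvDig c)]
      simp [List.length_cons]
      ring

theorem pvMain (cs : List Char) (hne : cs ≠ []) :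
    pvBLoop cs 0 =
      pvGeom cs.length + (pvALoop cs 0).1 + (if (pvALoop cs 0).2 then 0 else 1) := by
  induction cs with
  | nil => exact absurd rfl hne
  | cons c rest ih =>
    simp only [pvBLoop, pvALoop]
    split
    · -- zero digit hit
      simp only [if_true]
      rw [pvFloordiv_geom (rest.length + 1) (by omega)]
      simp [List.length_cons]
    · -- nonzero digit
      cases rest with
      | nil =>
        simp only [pvBLoop, pvALoop]
        simp [pvGeom]
      | cons c' rest' =>
        rw [pvBLoop_shift (c' :: rest') (0 * 9 + pvDig c),
            ih (by simp),
            pvALoop_shift (c' :: rest') ((0 : Int) + (pvDig c - 1) * 9 ^ (c' :: rest').length)]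
        simp only [List.length_cons]
        rw [pvGeom_succ (rest'.length + 1) (by omega)]
        split <;> ring

theorem pvToDigitsCore_ne_nil (f n : Nat) (ds : List Char) (h : ds ≠ []) :
    Nat.toDigitsCore 10 f n ds ≠ [] := by
  induction f generalizing n ds with
  | zero => simpa [Nat.toDigitsCore]
  | succ f ih =>
    simp only [Nat.toDigitsCore]
    split
    · simp
    · exact ih _ _ (by simp)

theorem pvToDigits_ne_nil (m : Nat) : Nat.toDigits 10 m ≠ [] := by
  unfold Nat.toDigits
  simp only [Nat.toDigitsCore]
  split
  · simp
  · exact pvToDigitsCore_ne_nil _ _ _ (by simp)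

theorem pvToChars_ne_nil (n : Int) (h : 0 ≤ n) : PySem.Int.toChars n ≠ [] := by
  unfold PySem.Int.toChars
  rw [if_neg (by omega)]
  exact pvToDigits_ne_nil _

-- ===== VERDICT (by name: the statement is the Claim_ definition above) =====
theorem countDistinct_spec : Claim_equal_countDistinct := by
  intro n _ hpre
  unfold Spec_countDistinct countDistinct countDistinct_alt
  have hs : (PySem.Int.toStr n).toList = PySem.Int.toChars n := PySem.Int.toList_toStr n
  rw [hs]
  set s := PySem.Int.toChars n with hsdef
  have hne : s ≠ [] := pvToChars_ne_nil n hpre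
  have hL : s.length - 1 + 1 = s.length := by
    have := List.length_pos_of_ne_nil hne; omega
  simp only
  rw [pvAGeom_fst, hL, pvALoop_shift s (pvGeom s.length), pvMain s hne]
  split <;> simp_all <;> ring
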